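-- pv_equiv track=rewrite | github.com/MLouis8/robinson-shensted | RS_Fomin_permutations.py | compute_path_tableau
-- ===== SOURCE A (Python) =====
-- def compute_path_tableau(p: list) -> list:
--     """Computes path tableau
--     Relation: Young-Fibonacci lattice path p -> path tableau tab
--
--     >>> compute_path_tableau([0, 1, 2, 12, 22, 212, 222, 2212])
--     [[3, 5, 7, 1], [4, 6, None, 2]]
--     """
--     def path_tableau_rules(a: list, b: list, k: int, l: int) -> tuple[int, int, list]:
--         match a[k]:
--             case 1:
--                 if b[l] == 2 or b[l] == 0: #ajout d'un 1
--                     a[k] = 0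
--                     return 0, k, a
--                 return path_tableau_rules(a, b, k+1, l+1)
--             case 2:
--                 if b[l] == 1 or b[l] == 0: #transformation d'un 1
--                     a[k] = 1
--                     return 1, k, a
--                 else:
--                     return path_tableau_rules(a, b, k+1, l+1)
--         return path_tableau_rules(a, b, k+1, l)
--     act = [int(i) for i in str(p[-1])]
--     tab = [[None]* len(act), [None]* len(act)]
--     s = sum(act)
--     for k in range(-2, -len(p)-1, -1):
--         i, j, act = path_tableau_rules(act, [int(h) for h in str(p[k])], 0, 0)
--         tab[i][j] = s
--         s -= 1
--     return tab
-- ===== SOURCE B (Python) =====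
-- def compute_path_tableau(p: list) -> list:
--     act = [int(c) for c in str(p[-1])]
--     n = len(act)
--     s = sum(act)
--     moves = []
--     for prev in reversed(p[:-1]):
--         b = [int(c) for c in str(prev)]
--         k = l = 0
--         while True:
--             if act[k] == 1 and (b[l] == 0 or b[l] == 2):
--                 act[k] = 0
--                 moves.append((0, k))
--                 break
--             if act[k] == 2 and (b[l] == 0 or b[l] == 1):
--                 act[k] = 1
--                 moves.append((1, k))
--                 break
--             if act[k] == 1 or act[k] == 2:
--                 k += 1
--                 l += 1
--             else:
--                 k += 1
--     tab = [[None] * n, [None] * n]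
--     for i, j in moves:
--         tab[i][j] = s
--         s -= 1
--     return tab
-- ===== Notes on version B (the rewrite author's own statement) =====
-- stated objective: alternative
-- what changed: The tail-recursive insertion-rule helper becomes an explicit while-loop over indices k,l, and the outer pass is split into two phases: first collect the (row,column) insertion moves along reversed(p[:-1]), then fill the tableau in a separate loop with the descending counter.
import Mathlib
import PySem

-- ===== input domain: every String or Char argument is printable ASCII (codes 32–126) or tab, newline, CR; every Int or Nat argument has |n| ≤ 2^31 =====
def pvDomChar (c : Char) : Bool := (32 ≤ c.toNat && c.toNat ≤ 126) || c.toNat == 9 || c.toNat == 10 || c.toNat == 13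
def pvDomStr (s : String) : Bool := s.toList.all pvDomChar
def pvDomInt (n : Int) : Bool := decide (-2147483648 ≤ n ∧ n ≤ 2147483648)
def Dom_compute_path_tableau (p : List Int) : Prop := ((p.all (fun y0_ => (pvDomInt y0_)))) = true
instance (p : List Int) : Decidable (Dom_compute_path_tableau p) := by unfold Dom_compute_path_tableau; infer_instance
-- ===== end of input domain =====

-- B replaces A's tail-recursive `path_tableau_rules` by an explicit while-loop with indices k,l and
-- separates the outer pass into two phases: collect the (row, column) insertion moves over
-- reversed(p[:-1]), then fill the tableau in a second loop (objective: alternative decomposition).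

-- shared helper: [int(c) for c in str(x)]  (exact: per-char int(); none = ValueError on '-')
def pvDigits (x : Int) : Option (List Int) :=
  (PySem.Int.toChars x).mapM (fun c => PySem.Int.ofChars? [c])

-- ===== PORT A =====
def path_tableau_rules (a b : List Int) (k l : Nat) : Option (Int × Nat × List Int) :=
  match h : a[k]? with
  | none => none                                  -- IndexError a[k]
  | some ak =>
    if ak = 1 then
      match b[l]? with
      | none => none                              -- IndexError b[l]
      | some bl =>
        if bl = 2 ∨ bl = 0 then some (0, k, a.set k 0)
        else path_tableau_rules a b (k+1) (l+1)
    else if ak = 2 then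
      match b[l]? with
      | none => none
      | some bl =>
        if bl = 1 ∨ bl = 0 then some (1, k, a.set k 1)
        else path_tableau_rules a b (k+1) (l+1)
    else path_tableau_rules a b (k+1) l
termination_by a.length - k
decreasing_by all_goals (have := List.getElem?_eq_some_iff.mp h |>.1 ; omega)

def pv_step_A (p : List Int) (st : Option (List Int × List (List (Option Int)) × Int)) (k : Int) :
    Option (List Int × List (List (Option Int)) × Int) :=
  st.bind fun (act, tab, s) =>
    (PySem.List.pyGet? p k).bind fun pk =>
    (pvDigits pk).bind fun bw =>
    (path_tableau_rules act bw 0 0).map fun (i, j, act') =>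
      (act', tab.modify i.toNat (fun row => row.set j (some s)), s - 1)

def compute_path_tableau (p : List Int) : List (List (Option Int)) :=
  match (PySem.List.pyGet? p (-1)).bind pvDigits with
  | none => []                                    -- IndexError/ValueError on act; outside Pre_
  | some act =>
    let tab : List (List (Option Int)) :=
      [List.replicate act.length none, List.replicate act.length none]
    let s : Int := act.sum
    (((PySem.List.pyRange (-2) (-(p.length : Int) - 1) (-1)).foldl
        (pv_step_A p) (some (act, tab, s))).map (fun st => st.2.1)).getD []

-- ===== PORT B =====
def pv_scan_B (act b : List Int) (k l : Nat) : Option (Int × Nat × List Int) :=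
  match h : act[k]? with
  | none => none                                  -- IndexError act[k]
  | some ak =>
    if ak == 1 || ak == 2 then
      match b[l]? with
      | none => none                              -- IndexError b[l]
      | some bl =>
        if ak == 1 && (bl == 0 || bl == 2) then some (0, k, act.set k 0)
        else if ak == 2 && (bl == 0 || bl == 1) then some (1, k, act.set k 1)
        else pv_scan_B act b (k+1) (l+1)
    else pv_scan_B act b (k+1) l
termination_by act.length - k
decreasing_by all_goals (have := List.getElem?_eq_some_iff.mp h |>.1 ; omega)

-- phase 1: collect the insertion moves (row, column) along reversed(p[:-1])
def pv_moves (act : List Int) (prevs : List Int) : Option (List (Int × Nat)) :=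
  match prevs with
  | [] => some []
  | x :: xs =>
    (pvDigits x).bind fun b =>
    (pv_scan_B act b 0 0).bind fun r =>
    (pv_moves r.2.2 xs).map (fun ms => (r.1, r.2.1) :: ms)

-- phase 2: fill the tableau, s counting down
def pv_fill (tab : List (List (Option Int))) (s : Int) : List (Int × Nat) → List (List (Option Int))
  | [] => tab
  | (i, j) :: ms => pv_fill (tab.modify i.toNat (fun row => row.set j (some s))) (s - 1) ms

def compute_path_tableau_alt (p : List Int) : List (List (Option Int)) :=
  match (PySem.List.pyGet? p (-1)).bind pvDigits with
  | none => []
  | some act =>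
    match pv_moves act p.dropLast.reverse with
    | none => []                                  -- a raise inside the loop; outside Pre_
    | some ms =>
      pv_fill [List.replicate act.length none, List.replicate act.length none] act.sum ms

-- ===== PRECONDITION & SPEC =====
-- spec-level one-step characterisation (non-recursive): pair the entries of a equal to 1 or 2, in
-- order, with the entries of b; the step returns iff some pair matches the insertion rule.
def pvMatch (x y : Int) : Bool := (x == 1 && (y == 0 || y == 2)) || (x == 2 && (y == 0 || y == 1))

def pvSpecStep (a b : List Int) : Option (List Int) :=
  ((((PySem.List.enumerate a).filter (fun q => q.2 == 1 || q.2 == 2)).zip b).find?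
      (fun q => pvMatch q.1.2 q.2)).map (fun q => a.set q.1.1.toNat (q.1.2 - 1))

-- Pre_ = exactly the inputs where A returns: p nonempty, all entries nonnegative (str-digit parse),
-- and every step of the scan finds a matching pair before running off either word.
def Pre_compute_path_tableau (p : List Int) : Prop :=
  p ≠ [] ∧ (∀ x ∈ p, 0 ≤ x) ∧
  (((PySem.List.pyGet? p (-1)).bind pvDigits).bind (fun a0 =>
      p.dropLast.reverse.foldl (fun o x => o.bind fun a => (pvDigits x).bind (pvSpecStep a))
        (some a0))).isSome
instance (p : List Int) : Decidable (Pre_compute_path_tableau p) := by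
  unfold Pre_compute_path_tableau; infer_instance

def pvWitness_compute_path_tableau : List Int := [0, 1, 2, 12, 22, 212, 222, 2212]

def Spec_compute_path_tableau (p : List Int) (out : List (List (Option Int))) : Prop := out = compute_path_tableau_alt p
instance (p : List Int) (out : List (List (Option Int))) : Decidable (Spec_compute_path_tableau p out) := by unfold Spec_compute_path_tableau; infer_instance

-- ===== CLAIM (what is proved, stated in full; the proofs are below) =====
def Claim_equal_compute_path_tableau : Prop := ∀ (p : List Int), Dom_compute_path_tableau p → Pre_compute_path_tableau p → Spec_compute_path_tableau p (compute_path_tableau p)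

-- ===== LEMMAS AND PROOFS =====

-- the two scans agree everywhere
theorem scan_eq_rules (a b : List Int) (k l : Nat) :
    pv_scan_B a b k l = path_tableau_rules a b k l := by
  fun_induction path_tableau_rules a b k l <;>
    rw [pv_scan_B] <;> split <;> simp_all <;> omega

-- A's step over an already-fetched element
def pv_step_E (st : Option (List Int × List (List (Option Int)) × Int)) (x : Int) :
    Option (List Int × List (List (Option Int)) × Int) :=
  st.bind fun (act, tab, s) =>
    (pvDigits x).bind fun bw =>
    (path_tableau_rules act bw 0 0).map fun r =>
      (r.2.2, tab.modify r.1.toNat (fun row => row.set r.2.1 (some s)), s - 1)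

theorem range_fetch (p : List Int) (hp : p ≠ []) :
    (PySem.List.pyRange (-2) (-(p.length : Int) - 1) (-1)).map (PySem.List.pyGet? p)
      = p.dropLast.reverse.map some := by
  have hn : 1 ≤ p.length := List.length_pos_of_ne_nil hp
  rw [PySem.List.pyRange_neg_one]
  have h1 : ((-2 : Int) - (-(p.length : Int) - 1)).toNat = p.length - 1 := by omega
  rw [h1]
  apply List.ext_getElem
  · simp
  · intro k h1 h2
    simp only [List.length_map, List.length_range] at h1
    simp only [List.getElem_map, List.getElem_range, List.getElem_reverse, List.getElem_dropLast,
      List.length_dropLast]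
    have hk : (-2 : Int) - (k : Int) = -(((k + 2 : Nat) : Int)) := by push_cast; ring
    rw [hk, show PySem.List.pyGet? p (-(((k + 2 : Nat)) : Int)) = p[p.length - (k + 2)]? from
      PySem.List.pyGet?_neg_natCast p (k + 2) (by omega) (by omega)]
    have h3 : p.length - (k + 2) = p.length - 1 - 1 - k := by omega
    simp only [h3]
    exact List.getElem?_eq_getElem (by omega)

theorem foldl_stepE_none (l : List Int) : l.foldl pv_step_E none = none := by
  induction l with
  | nil => rfl
  | cons x xs ih => simpa [pv_step_E] using ih

theorem main_fold (prevs : List Int) : ∀ (act : List Int) (tab : List (List (Option Int))) (s : Int),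
    ((prevs.foldl pv_step_E (some (act, tab, s))).map (fun st => st.2.1)).getD []
      = (match pv_moves act prevs with
         | none => []
         | some ms => pv_fill tab s ms) := by
  induction prevs with
  | nil => intro act tab s; simp [pv_moves, pv_fill]
  | cons x xs ih =>
    intro act tab s
    simp only [List.foldl_cons, pv_moves, pv_step_E]
    cases hd : pvDigits x with
    | none => simp [foldl_stepE_none]
    | some b =>
      simp only [Option.bind_some, scan_eq_rules]
      cases path_tableau_rules act b 0 0 with
      | none => simp [foldl_stepE_none]
      | some r =>
        simp only [Option.bind_some, Option.map_some]
        rw [ih]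
        cases pv_moves r.2.2 xs <;> simp [pv_fill]

theorem foldl_fetch (p : List Int) (l ys : List Int)
    (h : l.map (PySem.List.pyGet? p) = ys.map some) (init) :
    l.foldl (pv_step_A p) init = ys.foldl pv_step_E init := by
  induction l generalizing ys init with
  | nil => cases ys <;> simp_all
  | cons x xs ih =>
    cases ys with
    | nil => simp_all
    | cons y ys' =>
      simp only [List.map_cons, List.cons.injEq] at h
      obtain ⟨hx, ht⟩ := h
      simp only [List.foldl_cons]
      rw [ih ys' ht]
      congr 1
      cases init <;> simp [pv_step_A, pv_step_E, hx]

-- ===== VERDICT (by name: the statement is the Claim_ definition above) =====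
theorem compute_path_tableau_spec : Claim_equal_compute_path_tableau := by
  intro p _hdom _hpre
  show compute_path_tableau p = compute_path_tableau_alt p
  unfold compute_path_tableau compute_path_tableau_alt
  cases h0 : (PySem.List.pyGet? p (-1)).bind pvDigits with
  | none => rfl
  | some act =>
    have hp : p ≠ [] := by
      intro h; subst h; simp [PySem.List.pyGet?, PySem.List.pyIdx?] at h0
    simp only []
    rw [foldl_fetch p _ _ (range_fetch p hp)]
    rw [main_fold]
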